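-- pv_equiv track=rewrite | github.com/ephrem-ketachew/data-structure-and-algorithms | special-chars-II.py | numberOfSpecialChars
-- ===== SOURCE A (Python) =====
-- from collections import Counter
--
-- def numberOfSpecialChars(word: str) -> int:
--     counter = Counter(word)
--     cur_low_counter = Counter()
--     seen = set()
--     count = 0
--     for ch in word:
--         if ch.isupper() and ch not in seen and cur_low_counter[ch.lower()] == counter[ch.lower()] > 0:
--             count += 1
--         if ch.islower():
--             cur_low_counter[ch] += 1
--         else:
--             seen.add(ch)
--
--     return count
-- ===== SOURCE B (Python) =====
-- def numberOfSpecialChars(word: str) -> int: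
--     # For each distinct uppercase letter present, it is special iff its lowercase
--     # form occurs in the word and never at/after the first uppercase occurrence.
--     count = 0
--     for c in set(word):
--         if c.isupper() and c.lower() in word and c.lower() not in word[word.index(c):]:
--             count += 1
--     return count
-- ===== Notes on version B (the rewrite author's own statement) =====
-- stated objective: simpler
-- what changed: A's single streaming pass with a running lowercase Counter, a seen-set and chained comparisons is replaced by a direct per-letter check: for each distinct uppercase letter present, count it iff its lowercase form occurs in the word and never at or after the first uppercase occurrence.
import Mathlib
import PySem

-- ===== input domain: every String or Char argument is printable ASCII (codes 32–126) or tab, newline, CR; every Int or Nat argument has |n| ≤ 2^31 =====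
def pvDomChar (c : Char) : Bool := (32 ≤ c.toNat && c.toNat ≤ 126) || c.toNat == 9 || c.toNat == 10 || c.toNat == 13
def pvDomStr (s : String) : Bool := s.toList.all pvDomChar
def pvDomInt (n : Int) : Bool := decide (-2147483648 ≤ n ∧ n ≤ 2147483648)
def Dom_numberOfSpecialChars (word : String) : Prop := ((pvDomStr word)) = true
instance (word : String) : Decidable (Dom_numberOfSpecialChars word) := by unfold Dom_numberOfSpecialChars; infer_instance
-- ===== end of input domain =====

-- B replaces A's streaming pass (running lowercase counters + seen-set) by a direct check per
-- distinct uppercase letter (lowercase present and never at/after its first uppercase occurrence);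
-- objective: simpler.

-- ===== PORT A =====
-- loop body of A's 'for ch in word' (cnt = Counter(word); state = (cur_low_counter, seen, count))
def aStep (cnt : PySem.Dict Char Int)
    (s : PySem.Dict Char Int × PySem.Set Char × Int) (ch : Char) :
    PySem.Dict Char Int × PySem.Set Char × Int :=
  -- 'a == b > 0' is Python's chained comparison: a == b and b > 0
  let s :=
    if PySem.Chars.isupper ch = true ∧ ¬ PySem.Set.contains s.2.1 ch = true ∧
       s.1.getD (PySem.Chars.lowerChar ch) 0 = cnt.getD (PySem.Chars.lowerChar ch) 0 ∧
       0 < cnt.getD (PySem.Chars.lowerChar ch) 0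
    then (s.1, s.2.1, s.2.2 + 1) else s
  if PySem.Chars.islower ch = true then (PySem.Dict.modify s.1 ch 0 (· + 1), s.2.1, s.2.2)
  else (s.1, PySem.Set.add s.2.1 ch, s.2.2)

def numberOfSpecialChars (word : String) : Int :=
  let l := word.toList
  (l.foldl (aStep (PySem.Dict.counter l)) (PySem.Dict.empty, PySem.Set.empty, 0)).2.2

-- ===== PORT B =====
-- Source B: sum over set(word); counting 0/1 per element is independent of Python's set iteration
-- order.  'c.lower() in word' for a 1-char needle is char membership; 'word[word.index(c):]' with
-- the index of c (present, since c ∈ set(word)) is List.drop of that index.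
def numberOfSpecialChars_alt (word : String) : Int :=
  let l := word.toList
  (PySem.Set.ofList l).foldl
    (fun count c =>
      if PySem.Chars.isupper c = true ∧ PySem.Chars.lowerChar c ∈ l ∧
         PySem.Chars.lowerChar c ∉ l.drop ((PySem.List.index? l c).getD 0)
      then count + 1 else count) 0

-- ===== PRECONDITION & SPEC =====
def Spec_numberOfSpecialChars (word : String) (out : Int) : Prop := out = numberOfSpecialChars_alt word
instance (word : String) (out : Int) : Decidable (Spec_numberOfSpecialChars word out) := by unfold Spec_numberOfSpecialChars; infer_instance

-- ===== CLAIM (what is proved, stated in full; the proofs are below) =====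
def Claim_equal_numberOfSpecialChars : Prop := ∀ (word : String), Dom_numberOfSpecialChars word → Spec_numberOfSpecialChars word (numberOfSpecialChars word)

-- ===== LEMMAS AND PROOFS =====

theorem upper_not_lower (c : Char) (h : PySem.Chars.isupper c = true) :
    PySem.Chars.islower c = false := by
  simp only [PySem.Chars.isupper, Bool.and_eq_true, decide_eq_true_eq, Char.le_def,
    UInt32.le_iff_toNat_le] at h
  simp only [PySem.Chars.islower, Bool.and_eq_false_iff, decide_eq_false_iff_not, Char.le_def,
    UInt32.le_iff_toNat_le, not_le]
  have h1 : ('A').val.toNat = 65 := by decide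
  have h2 : ('Z').val.toNat = 90 := by decide
  have h3 : ('a').val.toNat = 97 := by decide
  omega

theorem lower_lowerChar (c : Char) (h : PySem.Chars.isupper c = true) :
    PySem.Chars.islower (PySem.Chars.lowerChar c) = true := by
  have h' := h
  simp only [PySem.Chars.isupper, Bool.and_eq_true, decide_eq_true_eq, Char.le_def,
    UInt32.le_iff_toNat_le] at h'
  have h1 : ('A').val.toNat = 65 := by decide
  have h2 : ('Z').val.toNat = 90 := by decide
  have h3 : ('a').val.toNat = 97 := by decide
  have h4 : ('z').val.toNat = 122 := by decide
  have htc : Char.toNat c = c.val.toNat := rfl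
  have hval : (c.toNat + 32).isValidChar := Or.inl (by rw [htc]; omega)
  have hv' : (Char.ofNat (c.toNat + 32)).val.toNat = c.val.toNat + 32 := by
    rw [show (Char.ofNat (c.toNat + 32)).val.toNat = (Char.ofNat (c.toNat + 32)).toNat from rfl,
      Char.toNat_ofNat, if_pos hval, htc]
  simp only [PySem.Chars.lowerChar, if_pos h, PySem.Chars.islower, Bool.and_eq_true,
    decide_eq_true_eq, Char.le_def, UInt32.le_iff_toNat_le, hv']
  omega

theorem idxOf?_of_mem (l : List Char) (c : Char) (h : c ∈ l) :
    List.idxOf? c l = some (List.idxOf c l) := by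
  induction l with
  | nil => simp at h
  | cons a t ih =>
    by_cases hac : a = c
    · subst hac; simp [List.idxOf?_cons, List.idxOf_cons_self]
    · have hct : c ∈ t := by
        rcases List.mem_cons.mp h with h1 | h1
        · exact absurd h1.symm hac
        · exact h1
      simp [List.idxOf?_cons, beq_iff_eq, hac, ih hct]

-- events of A's loop: prefix 'pre' already processed, 'rest' still to come, whole word 'l'
def specGo (l : List Char) : List Char → List Char → Nat
  | _, [] => 0
  | pre, c :: t =>
    (if c ∉ pre ∧ PySem.Chars.isupper c = true ∧ PySem.Chars.lowerChar c ∈ l ∧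
        PySem.Chars.lowerChar c ∉ c :: t then 1 else 0) + specGo l (pre ++ [c]) t

theorem ofList_append_singleton (xs : List Char) (c : Char) :
    PySem.Set.ofList (xs ++ [c]) = PySem.Set.add (PySem.Set.ofList xs) c := by
  simp [PySem.Set.ofList_eq_foldl, List.foldl_append]

theorem foldl_add_eq (t : List Char) : ∀ s : List Char,
    List.foldl PySem.Set.add s t
      = s ++ (PySem.Set.ofList t).filter (fun y => !(PySem.Set.contains s y)) := by
  induction t with
  | nil => intro s; simp [PySem.Set.ofList]
  | cons a t ih =>
    intro s
    rw [List.foldl_cons, ih (PySem.Set.add s a),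
      show PySem.Set.ofList (a :: t) = List.foldl PySem.Set.add (PySem.Set.add [] a) t from rfl,
      show PySem.Set.add ([] : List Char) a = [a] from by simp [PySem.Set.add, PySem.Set.contains],
      ih [a]]
    simp only [PySem.Set.add, PySem.Set.contains, List.contains_eq_mem]
    by_cases ha : a ∈ s
    · simp only [ha, decide_true, if_true]
      rw [List.filter_append, List.filter_filter]
      simp only [List.filter_cons]
      simp [ha]
      apply List.filter_congr
      intro y hy
      by_cases hya : y = a
      · subst hya; simp [ha]
      · simp [hya]
    · simp only [ha, decide_false, Bool.false_eq_true, if_false]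
      rw [List.filter_append, List.filter_filter, List.append_assoc]
      congr 1
      simp only [List.filter_cons, List.mem_singleton]
      simp only [ha, decide_false, Bool.not_false, if_true]
      congr 1
      apply List.filter_congr
      intro y hy
      simp [List.mem_append]

theorem ofList_cons (c : Char) (t : List Char) :
    PySem.Set.ofList (c :: t) = c :: (PySem.Set.ofList t).filter (fun y => !(y == c)) := by
  rw [show PySem.Set.ofList (c :: t) = List.foldl PySem.Set.add (PySem.Set.add [] c) t from rfl,
    show PySem.Set.add ([] : List Char) c = [c] from by simp [PySem.Set.add, PySem.Set.contains],
    foldl_add_eq t [c]]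
  simp only [List.singleton_append, List.cons.injEq, true_and]
  apply List.filter_congr
  intro y hy
  simp only [PySem.Set.contains, List.contains_eq_mem, List.mem_singleton]
  by_cases h : y = c
  · simp [h]
  · simp [h]

theorem loopA (l : List Char) : ∀ (rest pre : List Char), l = pre ++ rest → ∀ k : Int,
    (rest.foldl (aStep (PySem.Dict.counter l))
       (PySem.Dict.counter (pre.filter PySem.Chars.islower),
        PySem.Set.ofList (pre.filter fun c => !PySem.Chars.islower c), k)).2.2
    = k + specGo l pre rest := by
  intro rest
  induction rest with
  | nil => intro pre h k; simp [specGo]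
  | cons c t ih =>
    intro pre h k
    have hE : (PySem.Chars.isupper c = true ∧
        ¬ PySem.Set.contains (PySem.Set.ofList (pre.filter fun c => !PySem.Chars.islower c)) c = true ∧
        (PySem.Dict.counter (pre.filter PySem.Chars.islower)).getD (PySem.Chars.lowerChar c) 0
          = (PySem.Dict.counter l).getD (PySem.Chars.lowerChar c) 0 ∧
        0 < (PySem.Dict.counter l).getD (PySem.Chars.lowerChar c) 0)
      ↔ (c ∉ pre ∧ PySem.Chars.isupper c = true ∧ PySem.Chars.lowerChar c ∈ l ∧
         PySem.Chars.lowerChar c ∉ c :: t) := by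
      by_cases hu : PySem.Chars.isupper c = true
      · set x := PySem.Chars.lowerChar c with hxdef
        have hlx := lower_lowerChar c hu
        have hseen : PySem.Set.contains
            (PySem.Set.ofList (pre.filter fun c => !PySem.Chars.islower c)) c = true ↔ c ∈ pre := by
          show List.contains _ c = true ↔ _
          rw [List.contains_eq_mem, decide_eq_true_eq, PySem.Set.mem_ofList, List.mem_filter]
          simp [upper_not_lower c hu]
        rw [PySem.Dict.getD_counter, PySem.Dict.getD_counter,
          List.count_filter (p := PySem.Chars.islower) (a := x) hlx]
        have hcnt : List.count x l = List.count x pre + List.count x (c :: t) := by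
          rw [h, List.count_append]
        constructor
        · rintro ⟨-, hns, heq, hpos⟩
          have heq' : List.count x pre = List.count x l := by exact_mod_cast heq
          have hpos' : 0 < List.count x l := by exact_mod_cast hpos
          refine ⟨fun hc => hns (hseen.mpr hc), hu, List.count_pos_iff.mp hpos', ?_⟩
          rw [← List.count_eq_zero (a := x)] at *
          omega
        · rintro ⟨hnp, -, hxl, hxnt⟩
          have h1 : List.count x (c :: t) = 0 := List.count_eq_zero.mpr hxnt
          have h2 : 0 < List.count x l := List.count_pos_iff.mpr hxl
          refine ⟨hu, fun hs => hnp (hseen.mp hs), ?_, by exact_mod_cast h2⟩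
          have : List.count x pre = List.count x l := by omega
          exact_mod_cast this
      · constructor
        · rintro ⟨h1, -⟩; exact absurd h1 hu
        · rintro ⟨-, h1, -⟩; exact absurd h1 hu
    rw [List.foldl_cons]
    have hstep : aStep (PySem.Dict.counter l)
        (PySem.Dict.counter (pre.filter PySem.Chars.islower),
         PySem.Set.ofList (pre.filter fun c => !PySem.Chars.islower c), k) c
      = (PySem.Dict.counter ((pre ++ [c]).filter PySem.Chars.islower),
         PySem.Set.ofList ((pre ++ [c]).filter fun c => !PySem.Chars.islower c),
         k + if c ∉ pre ∧ PySem.Chars.isupper c = true ∧ PySem.Chars.lowerChar c ∈ l ∧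
              PySem.Chars.lowerChar c ∉ c :: t then 1 else 0) := by
      unfold aStep
      rw [if_congr hE rfl rfl]
      by_cases hC : (c ∉ pre ∧ PySem.Chars.isupper c = true ∧ PySem.Chars.lowerChar c ∈ l ∧
          PySem.Chars.lowerChar c ∉ c :: t)
      · have hlo : PySem.Chars.islower c = false := upper_not_lower c hC.2.1
        simp only [hC, hlo, Bool.false_eq_true, if_false]
        rw [List.filter_append, List.filter_append]
        simp [hlo, ofList_append_singleton]
      · simp only [hC, if_false]
        by_cases hlo : PySem.Chars.islower c = true
        · simp only [hlo, if_true]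
          rw [List.filter_append, List.filter_append]
          simp [hlo, PySem.Dict.counter_append_singleton]
        · simp only [hlo]
          rw [List.filter_append, List.filter_append]
          simp only [List.filter_cons, hlo, Bool.not_false, Bool.false_eq_true, if_false]
          simp [ofList_append_singleton]
    rw [hstep, ih (pre ++ [c]) (by rw [h, List.append_assoc]; rfl) _]
    show _ = k + specGo l pre (c :: t)
    rw [specGo]
    push_cast
    ring

theorem specGo_eq (l : List Char) : ∀ (rest pre : List Char),
    specGo l pre rest = (PySem.Set.ofList rest).countP (fun c =>
      decide (c ∉ pre ∧ PySem.Chars.isupper c = true ∧ PySem.Chars.lowerChar c ∈ l ∧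
              PySem.Chars.lowerChar c ∉ rest.drop (List.idxOf c rest))) := by
  intro rest
  induction rest with
  | nil => intro pre; simp [specGo, PySem.Set.ofList]
  | cons c t ih =>
    intro pre
    rw [specGo, ih (pre ++ [c]), ofList_cons, List.countP_cons, List.countP_filter]
    have hhead : (decide (c ∉ pre ∧ PySem.Chars.isupper c = true ∧ PySem.Chars.lowerChar c ∈ l ∧
        PySem.Chars.lowerChar c ∉ (c :: t).drop (List.idxOf c (c :: t))))
        = decide (c ∉ pre ∧ PySem.Chars.isupper c = true ∧ PySem.Chars.lowerChar c ∈ l ∧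
        PySem.Chars.lowerChar c ∉ c :: t) := by
      rw [List.idxOf_cons_self, List.drop_zero]
    have htail : List.countP (fun y =>
          decide (y ∉ pre ++ [c] ∧ PySem.Chars.isupper y = true ∧ PySem.Chars.lowerChar y ∈ l ∧
            PySem.Chars.lowerChar y ∉ t.drop (List.idxOf y t))) (PySem.Set.ofList t)
        = List.countP (fun y =>
          decide (y ∉ pre ∧ PySem.Chars.isupper y = true ∧ PySem.Chars.lowerChar y ∈ l ∧
            PySem.Chars.lowerChar y ∉ (c :: t).drop (List.idxOf y (c :: t))) && !(y == c))
          (PySem.Set.ofList t) := by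
      apply List.countP_congr
      intro y hy
      simp only [Bool.and_eq_true, decide_eq_true_eq, Bool.not_eq_true', beq_eq_false_iff_ne,
        List.mem_append, List.mem_singleton, not_or]
      constructor
      · rintro ⟨⟨hyp, hyc⟩, hu, hxl, hxd⟩
        refine ⟨⟨hyp, hu, hxl, ?_⟩, hyc⟩
        rw [List.idxOf_cons, beq_eq_false_iff_ne.mpr (Ne.symm hyc)]
        simpa using hxd
      · rintro ⟨⟨hyp, hu, hxl, hxd⟩, hyc⟩
        refine ⟨⟨hyp, hyc⟩, hu, hxl, ?_⟩
        rw [List.idxOf_cons, beq_eq_false_iff_ne.mpr (Ne.symm hyc)] at hxd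
        simpa using hxd
    rw [hhead, htail]
    simp only [decide_eq_true_eq]
    omega

-- ===== VERDICT (by name: the statement is the Claim_ definition above) =====
theorem numberOfSpecialChars_spec : Claim_equal_numberOfSpecialChars := by
  intro word _
  unfold Spec_numberOfSpecialChars numberOfSpecialChars numberOfSpecialChars_alt
  set l := word.toList with hl
  have hA := loopA l l [] rfl 0
  simp only [List.filter_nil] at hA
  rw [show (PySem.Dict.counter ([] : List Char)) = PySem.Dict.empty from rfl,
    show (PySem.Set.ofList ([] : List Char)) = PySem.Set.empty from rfl] at hA
  rw [hA, specGo_eq l l []]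
  rw [PySem.List.foldl_ite_add_one
    (fun c => PySem.Chars.isupper c = true ∧ PySem.Chars.lowerChar c ∈ l ∧
      PySem.Chars.lowerChar c ∉ l.drop ((PySem.List.index? l c).getD 0)) (PySem.Set.ofList l) 0]
  rw [List.countP_congr (fun c hc => ?_)]
  have hcl : c ∈ l := (PySem.Set.mem_ofList l c).mp hc
  rw [PySem.List.index?_eq_idxOf?, idxOf?_of_mem l c hcl]
  simp
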